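-- pv_equiv track=rewrite | github.com/m-rishabh-007/Platform_questions | mca_friday/problem_emirp_numbers/solution.py | find_nth_emirp
-- ===== SOURCE A (Python) =====
-- def find_nth_emirp(n):
--     """
--     Find the n-th Emirp number.
--
--     :type n: int
--     :rtype: int
--     """
--     def is_prime(num):
--         if num < 2:
--             return False
--         if num == 2:
--             return True
--         if num % 2 == 0:
--             return False
--
--         i = 3
--         while i * i <= num:
--             if num % i == 0:
--                 return False
--             i += 2
--         return True
--
--     def reverse_number(num):
--         return int(str(num)[::-1])
--
--     def is_emirp(num):
--         if not is_prime(num):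
--             return False
--
--         reversed_num = reverse_number(num)
--
--         # Must be different (not palindrome) and prime
--         return reversed_num != num and is_prime(reversed_num)
--
--     count = 0
--     num = 2
--
--     while count < n:
--         if is_emirp(num):
--             count += 1
--             if count == n:
--                 return num
--         num += 1
--
--     return -1
-- ===== SOURCE B (Python) =====
-- def find_nth_emirp(n):
--     """
--     Find the n-th Emirp number.
--
--     Re-implementation: trial division only by a cached, incrementally grown
--     list of primes (instead of re-dividing by every odd number for every
--     candidate), threaded through the whole search.
--     """
--     primes = [2]   # all primes <= checked, in increasing order
--     checked = 2    # every number <= checked has been classified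
--
--     def has_small_factor(num):
--         # True iff some prime p with p * p <= num divides num
--         for p in primes:
--             if p * p > num:
--                 return False
--             if num % p == 0:
--                 return True
--         return False
--
--     def extend_to(x):
--         # grow the prime table until checked * checked >= x
--         nonlocal checked
--         while checked * checked < x:
--             checked += 1
--             if not has_small_factor(checked):
--                 primes.append(checked)
--
--     def is_prime(num):
--         if num < 2:
--             return False
--         extend_to(num)
--         return not has_small_factor(num)
--
--     if n <= 0:
--         return -1
--     count = 0
--     num = 2
--     while True:
--         if is_prime(num):
--             r = int(str(num)[::-1])
--             if r != num and is_prime(r):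
--                 count += 1
--                 if count == n:
--                     return num
--         num += 1
-- ===== Notes on version B (the rewrite author's own statement) =====
-- stated objective: faster
-- what changed: B replaces A's per-candidate odd-step trial division with trial division by an incrementally grown cached list of primes (only primes up to sqrt are tried, with early exit), threading the prime table through the whole search.
import Mathlib
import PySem

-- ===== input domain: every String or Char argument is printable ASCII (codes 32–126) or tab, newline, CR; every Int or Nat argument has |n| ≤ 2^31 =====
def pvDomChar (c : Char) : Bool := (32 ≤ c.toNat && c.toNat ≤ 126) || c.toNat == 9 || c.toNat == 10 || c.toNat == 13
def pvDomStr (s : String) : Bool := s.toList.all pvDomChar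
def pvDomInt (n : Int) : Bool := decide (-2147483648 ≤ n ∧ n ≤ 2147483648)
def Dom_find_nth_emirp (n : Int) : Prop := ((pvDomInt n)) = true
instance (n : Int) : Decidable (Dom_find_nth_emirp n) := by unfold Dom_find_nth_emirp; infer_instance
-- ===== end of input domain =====

-- B replaces A's per-candidate odd-step trial division with trial division by an incrementally
-- grown cached list of primes (objective: faster, measured). Both Python loops are unbounded
-- searches; the ports bound them with the same generous fuel, consumed one unit per candidate.

-- ===== PORT A =====

-- termination measures for the two while-loops (cited by name in decreasing_by)
lemma pvA_primeLoop_dec (num i : Int) (h : i * i ≤ num) :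
    (num + 2 - (i + 2)).toNat < (num + 2 - i).toNat := by
  have hi : i ≤ num := by nlinarith [sq_nonneg i]
  omega

lemma pvB_extend_dec (x checked : Int) (h : checked * checked < x) :
    (x - (checked + 1)).toNat < (x - checked).toNat := by
  have hc : checked ≤ checked * checked := by nlinarith [sq_nonneg checked]
  omega

-- the `while i * i <= num:` loop of A's is_prime
def pvA_primeLoop (num i : Int) : Bool :=
  if _h : i * i ≤ num then
    if PySem.Int.mod num i = 0 then false
    else pvA_primeLoop num (i + 2)
  else true
termination_by (num + 2 - i).toNat
decreasing_by exact pvA_primeLoop_dec num i _h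

def pvA_isPrime (num : Int) : Bool :=
  if num < 2 then false
  else if num = 2 then true
  else if PySem.Int.mod num 2 = 0 then false
  else pvA_primeLoop num 3

-- int(str(num)[::-1]); s[::-1] is PySem.Str.slice? s none none (-1) = the reversed char list.
-- int() never fails on the inputs this is applied to (decimal strings of numbers ≥ 2 reversed),
-- so the `getD 0` default is unreachable.
def pvA_reverse (num : Int) : Int :=
  (PySem.Int.ofChars? ((PySem.Int.toChars num).reverse)).getD 0

def pvA_isEmirp (num : Int) : Bool :=
  if !pvA_isPrime num then false
  else
    let reversed := pvA_reverse num
    decide (reversed ≠ num) && pvA_isPrime reversed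

-- the `while count < n:` loop; fuel bounds the unbounded Python search (one unit per candidate num)
def pvA_scan (n count num : Int) : Nat → Int
  | 0 => if count < n then -1 else -1
  | fuel + 1 =>
    if count < n then
      if pvA_isEmirp num then
        if count + 1 = n then num
        else pvA_scan n (count + 1) (num + 1) fuel
      else pvA_scan n count (num + 1) fuel
    else -1

def pvFuelBound (n : Int) : Nat := (n.toNat + 1) * 100000

def find_nth_emirp (n : Int) : Int := pvA_scan n 0 2 (pvFuelBound n)

-- ===== PORT B =====

-- B's has_small_factor: scan the cached prime list with early exit at p * p > num
def pvB_hasSmallFactor (num : Int) : List Int → Bool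
  | [] => false
  | p :: ps =>
    if p * p > num then false
    else if PySem.Int.mod num p = 0 then true
    else pvB_hasSmallFactor num ps

-- B's extend_to: grow (primes, checked) until checked * checked >= x
def pvB_extend (x : Int) (primes : List Int) (checked : Int) : List Int × Int :=
  if _h : checked * checked < x then
    if !pvB_hasSmallFactor (checked + 1) primes then
      pvB_extend x (primes ++ [checked + 1]) (checked + 1)
    else
      pvB_extend x primes (checked + 1)
  else (primes, checked)
termination_by (x - checked).toNat
decreasing_by all_goals exact pvB_extend_dec x checked _h

-- B's is_prime: returns the answer together with the updated table state
def pvB_isPrime (num : Int) (primes : List Int) (checked : Int) : Bool × List Int × Int :=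
  if num < 2 then (false, primes, checked)
  else
    let st := pvB_extend num primes checked
    (!pvB_hasSmallFactor num st.1, st.1, st.2)

-- identical to A's reverse_number (both Pythons use int(str(num)[::-1]))
def pvB_reverse (num : Int) : Int :=
  (PySem.Int.ofChars? ((PySem.Int.toChars num).reverse)).getD 0

-- B's `while True:` search loop; same fuel device as A's port (one unit per candidate num)
def pvB_scan (n count num : Int) (primes : List Int) (checked : Int) : Nat → Int
  | 0 => -1
  | fuel + 1 =>
    let t1 := pvB_isPrime num primes checked
    if t1.1 then
      let r := pvB_reverse num
      if decide (r ≠ num) then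
        let t2 := pvB_isPrime r t1.2.1 t1.2.2
        if t2.1 then
          if count + 1 = n then num
          else pvB_scan n (count + 1) (num + 1) t2.2.1 t2.2.2 fuel
        else pvB_scan n count (num + 1) t2.2.1 t2.2.2 fuel
      else pvB_scan n count (num + 1) t1.2.1 t1.2.2 fuel
    else pvB_scan n count (num + 1) t1.2.1 t1.2.2 fuel

def find_nth_emirp_alt (n : Int) : Int :=
  if n ≤ 0 then -1
  else pvB_scan n 0 2 [2] 2 (pvFuelBound n)

-- ===== PRECONDITION & SPEC =====
def Spec_find_nth_emirp (n : Int) (out : Int) : Prop := out = find_nth_emirp_alt n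
instance (n : Int) (out : Int) : Decidable (Spec_find_nth_emirp n out) := by unfold Spec_find_nth_emirp; infer_instance

-- ===== CLAIM (what is proved, stated in full; the proofs are below) =====
def Claim_equal_find_nth_emirp : Prop := ∀ (n : Int), Dom_find_nth_emirp n → Spec_find_nth_emirp n (find_nth_emirp n)

-- ===== LEMMAS AND PROOFS =====

-- the common value both primality routines compute
def pvSpecPrime (num : Int) : Bool := decide (2 ≤ num ∧ Nat.Prime num.toNat)

-- all primes ≤ c, as Ints, in increasing order: the invariant shape of B's table
def pvPrimesUpTo (c : Int) : List Int :=
  ((List.range (c.toNat + 1)).filter (fun m => decide (Nat.Prime m))).map Int.ofNat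
lemma pvA_primeLoop_char (num : Int) : ∀ (i : Int), 0 < i →
    (pvA_primeLoop num i = true ↔
      ∀ d : Int, i ≤ d → 2 ∣ (d - i) → d * d ≤ num → ¬ d ∣ num) := by
  intro i
  induction i using pvA_primeLoop.induct (num := num) with
  | case1 i hle hmod =>
    intro hi
    have hdvd : i ∣ num := (PySem.Int.mod_eq_zero_iff_dvd num i).mp hmod
    have hfalse : pvA_primeLoop num i = false := by
      rw [pvA_primeLoop]; simp [hle, hmod]
    rw [hfalse]
    simp only [Bool.false_eq_true, false_iff]
    push_neg
    exact ⟨i, le_refl i, by omega, hle, hdvd⟩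
  | case2 i hle hmod ih =>
    intro hi
    have hndvd : ¬ i ∣ num := fun h => hmod ((PySem.Int.mod_eq_zero_iff_dvd num i).mpr h)
    have hloop : pvA_primeLoop num i = pvA_primeLoop num (i + 2) := by
      rw [pvA_primeLoop]; simp [hle, hmod]
    rw [hloop, ih (by omega)]
    constructor
    · intro h d hd hpar hdd
      by_cases hdi : d = i
      · subst hdi; exact hndvd
      · exact h d (by omega) (by omega) hdd
    · intro h d hd hpar hdd
      exact h d (by omega) (by omega) hdd
  | case3 i hle =>
    intro hi
    have htrue : pvA_primeLoop num i = true := by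
      rw [pvA_primeLoop]; simp [hle]
    rw [htrue]
    simp only [true_iff]
    intro d hd _ hdd
    exfalso
    have : i * i ≤ d * d := mul_self_le_mul_self (by omega) hd
    omega

lemma pvA_isPrime_eq (num : Int) : pvA_isPrime num = pvSpecPrime num := by
  unfold pvA_isPrime pvSpecPrime
  by_cases h1 : num < 2
  · simp only [h1, if_true]
    have : ¬ (2 ≤ num) := by omega
    simp [this]
  · simp only [h1, if_false]
    by_cases h2 : num = 2
    · subst h2
      simp [Nat.prime_two]
    · simp only [h2, if_false]
      have hge : 3 ≤ num := by omega
      set m : Nat := num.toNat with hm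
      have hnum : num = (m : Int) := by omega
      by_cases h3 : PySem.Int.mod num 2 = 0
      · simp only [h3, if_true]
        have hdvd : (2 : Int) ∣ num := (PySem.Int.mod_eq_zero_iff_dvd num 2).mp h3
        have hdm : 2 ∣ m := by omega
        have : ¬ Nat.Prime m := by
          intro hp
          rcases (Nat.Prime.eq_one_or_self_of_dvd hp 2 hdm) with h | h <;> omega
        simp [this]
      · simp only [h3, if_false]
        have hodd : ¬ (2 : Int) ∣ num := fun h => h3 ((PySem.Int.mod_eq_zero_iff_dvd num 2).mpr h)
        have hoddm : m % 2 = 1 := by omega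
        rw [Bool.eq_iff_iff, decide_eq_true_eq, pvA_primeLoop_char num 3 (by omega)]
        have h2le : (2 ≤ num) := by omega
        constructor
        · intro h
          refine ⟨h2le, ?_⟩
          by_contra hnp
          have hm1 : m ≠ 1 := by omega
          have hp : Nat.Prime m.minFac := Nat.minFac_prime hm1
          have hpd : m.minFac ∣ m := Nat.minFac_dvd m
          have hsq : m.minFac ^ 2 ≤ m := Nat.minFac_sq_le_self (by omega) hnp
          have hne2 : m.minFac ≠ 2 := by
            intro he
            exact absurd (he ▸ hpd) (by omega)
          have hge3 : 3 ≤ m.minFac := by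
            have := hp.two_le
            -- minFac is odd here: if it were even it would be 2
            rcases Nat.lt_or_ge m.minFac 3 with h' | h'
            · interval_cases h'' : m.minFac <;> omega
            · exact h'
          have hpodd : m.minFac % 2 = 1 := by
            rcases Nat.mod_two_eq_zero_or_one m.minFac with h' | h'
            · exfalso
              have : 2 ∣ m.minFac := by omega
              rcases (Nat.Prime.eq_one_or_self_of_dvd hp 2 this) with h'' | h'' <;> omega
            · exact h'
          have := h ((m.minFac : Nat) : Int) (by exact_mod_cast hge3) (by omega)
            (by rw [hnum]; exact_mod_cast (by nlinarith [hsq] : m.minFac * m.minFac ≤ m))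
            (by rw [hnum]; exact_mod_cast hpd)
          exact this
        · rintro ⟨-, hp⟩ d hd hpar hdd hdvd
          set e : Nat := d.toNat with he
          have hde : d = (e : Int) := by omega
          have hedvd : e ∣ m := by
            rw [hde, hnum] at hdvd
            exact_mod_cast hdvd
          rcases (Nat.Prime.eq_one_or_self_of_dvd hp e hedvd) with h' | h'
          · omega
          · have : d * d ≤ (m : Int) := by rw [← hnum]; exact hdd
            rw [hde] at this
            have : e * e ≤ m := by exact_mod_cast this
            nlinarith [this, hge]
lemma pv_mem_primesUpTo (a c : Int) :
    a ∈ pvPrimesUpTo c ↔ ∃ q : Nat, Nat.Prime q ∧ q ≤ c.toNat ∧ a = (q : Int) := by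
  unfold pvPrimesUpTo
  rw [List.mem_map]
  constructor
  · rintro ⟨q, hq, rfl⟩
    rw [List.mem_filter, List.mem_range] at hq
    exact ⟨q, by simpa using hq.2, by omega, rfl⟩
  · rintro ⟨q, hp, hq, rfl⟩
    exact ⟨q, by rw [List.mem_filter, List.mem_range]; exact ⟨by omega, by simpa using hp⟩, rfl⟩

lemma pv_primesUpTo_sorted (c : Int) : (pvPrimesUpTo c).Pairwise (· < ·) := by
  unfold pvPrimesUpTo
  exact List.Pairwise.map _ (fun a b (h : a < b) => Int.ofNat_lt.mpr h)
    ((List.pairwise_lt_range).filter _)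

lemma pvPrimesUpTo_succ (c : Int) (hc : 0 ≤ c) :
    pvPrimesUpTo (c + 1) =
      pvPrimesUpTo c ++ (if Nat.Prime (c.toNat + 1) then [c + 1] else []) := by
  unfold pvPrimesUpTo
  have h1 : (c + 1).toNat = c.toNat + 1 := by omega
  rw [h1, List.range_succ, List.filter_append, List.map_append]
  congr 1
  by_cases hp : Nat.Prime (c.toNat + 1) <;> simp [hp] <;> omega
lemma pv_primesUpTo_two_le (c : Int) : ∀ p ∈ pvPrimesUpTo c, 2 ≤ p := by
  intro p hp
  rcases (pv_mem_primesUpTo p c).mp hp with ⟨q, hq, _, rfl⟩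
  exact_mod_cast hq.two_le

lemma pvB_hasSmallFactor_char (num : Int) (ps : List Int)
    (hs : ps.Pairwise (· < ·)) (h2 : ∀ p ∈ ps, 2 ≤ p) :
    (pvB_hasSmallFactor num ps = true ↔ ∃ p ∈ ps, p * p ≤ num ∧ p ∣ num) := by
  induction ps with
  | nil => simp [pvB_hasSmallFactor]
  | cons p ps ih =>
    rw [pvB_hasSmallFactor]
    have hp2 : 2 ≤ p := h2 p (List.mem_cons_self ..)
    by_cases hgt : p * p > num
    · simp only [hgt, if_true, Bool.false_eq_true, false_iff]
      rintro ⟨q, hq, hqq, _⟩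
      rcases List.mem_cons.mp hq with rfl | hq'
      · omega
      · have hpq : p < q := (List.pairwise_cons.mp hs).1 q hq'
        nlinarith
    · simp only [hgt, if_false]
      by_cases hmod : PySem.Int.mod num p = 0
      · simp only [hmod, if_true, true_iff]
        exact ⟨p, List.mem_cons_self .., by omega, (PySem.Int.mod_eq_zero_iff_dvd num p).mp hmod⟩
      · simp only [hmod, if_false]
        rw [ih (List.pairwise_cons.mp hs).2 (fun q hq => h2 q (List.mem_cons_of_mem _ hq))]
        constructor
        · rintro ⟨q, hq, hqq, hqd⟩
          exact ⟨q, List.mem_cons_of_mem _ hq, hqq, hqd⟩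
        · rintro ⟨q, hq, hqq, hqd⟩
          rcases List.mem_cons.mp hq with rfl | hq'
          · exact absurd ((PySem.Int.mod_eq_zero_iff_dvd num q).mpr hqd) hmod
          · exact ⟨q, hq', hqq, hqd⟩

lemma pvB_hasSmallFactor_prime (num c : Int) (hc : 2 ≤ c) (h2 : 2 ≤ num)
    (hcov : num ≤ c * c) :
    pvB_hasSmallFactor num (pvPrimesUpTo c) = !decide (Nat.Prime num.toNat) := by
  set m : Nat := num.toNat with hm
  have hnum : num = (m : Int) := by omega
  rw [Bool.eq_iff_iff]
  rw [pvB_hasSmallFactor_char num _ (pv_primesUpTo_sorted c) (pv_primesUpTo_two_le c)]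
  simp only [Bool.not_eq_eq_eq_not, Bool.not_true, decide_eq_false_iff_not,
    Bool.not_eq_true', decide_eq_false_iff_not]
  constructor
  · rintro ⟨p, hp, hpp, hpd⟩
    rcases (pv_mem_primesUpTo p c).mp hp with ⟨q, hq, _, rfl⟩
    intro hprime
    have hqd : q ∣ m := by rw [hnum] at hpd; exact_mod_cast hpd
    rcases hprime.eq_one_or_self_of_dvd q hqd with h' | h'
    · have := hq.two_le; omega
    · have h2m : 2 ≤ m := h' ▸ hq.two_le
      rw [h', hnum] at hpp
      have hmm : m * m ≤ m := by exact_mod_cast hpp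
      nlinarith
  · intro hnp
    have hm2 : 2 ≤ m := by omega
    have hm1 : m ≠ 1 := by omega
    have hp : Nat.Prime m.minFac := Nat.minFac_prime hm1
    have hpd : m.minFac ∣ m := Nat.minFac_dvd m
    have hsq : m.minFac ^ 2 ≤ m := Nat.minFac_sq_le_self (by omega) hnp
    have hmem : ((m.minFac : Nat) : Int) ∈ pvPrimesUpTo c := by
      rw [pv_mem_primesUpTo]
      refine ⟨m.minFac, hp, ?_, rfl⟩
      by_contra hgt
      push_neg at hgt
      have h1 : (m.minFac : Int) * m.minFac ≤ num := by
        rw [hnum]; exact_mod_cast (by nlinarith : m.minFac * m.minFac ≤ m)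
      have h2' : c < (m.minFac : Int) := by omega
      nlinarith
    refine ⟨(m.minFac : Int), hmem, ?_, ?_⟩
    · rw [hnum]; exact_mod_cast (by nlinarith : m.minFac * m.minFac ≤ m)
    · rw [hnum]; exact_mod_cast hpd

lemma pvB_extend_spec (x : Int) : ∀ (ps : List Int) (c : Int), 2 ≤ c →
    ps = pvPrimesUpTo c →
    2 ≤ (pvB_extend x ps c).2 ∧ (pvB_extend x ps c).1 = pvPrimesUpTo (pvB_extend x ps c).2 ∧
      x ≤ (pvB_extend x ps c).2 * (pvB_extend x ps c).2 := by
  intro ps c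
  induction ps, c using pvB_extend.induct (x := x) with
  | case1 ps c hlt hns ih =>
    intro hc hps
    have hcov : c + 1 ≤ c * c := by nlinarith
    have hhsf : pvB_hasSmallFactor (c + 1) ps = !decide (Nat.Prime (c + 1).toNat) := by
      rw [hps]; exact pvB_hasSmallFactor_prime (c + 1) c hc (by omega) (by omega)
    have hprime : Nat.Prime (c.toNat + 1) := by
      have h := hns
      rw [hhsf] at h
      simp only [Bool.not_not] at h
      have h1 : (c + 1).toNat = c.toNat + 1 := by omega
      rw [h1] at h
      simpa using h
    have hnew : ps ++ [c + 1] = pvPrimesUpTo (c + 1) := by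
      rw [pvPrimesUpTo_succ c (by omega), hps, if_pos hprime]
    rw [pvB_extend, dif_pos hlt, if_pos hns]
    exact ih (by omega) hnew
  | case2 ps c hlt hns ih =>
    intro hc hps
    have hcov : c + 1 ≤ c * c := by nlinarith
    have hhsf : pvB_hasSmallFactor (c + 1) ps = !decide (Nat.Prime (c + 1).toNat) := by
      rw [hps]; exact pvB_hasSmallFactor_prime (c + 1) c hc (by omega) (by omega)
    have hnprime : ¬ Nat.Prime (c.toNat + 1) := by
      intro hp
      apply hns
      rw [hhsf]
      have h1 : (c + 1).toNat = c.toNat + 1 := by omega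
      simp [h1, hp]
    have hsame : ps = pvPrimesUpTo (c + 1) := by
      rw [pvPrimesUpTo_succ c (by omega), hps, if_neg hnprime, List.append_nil]
    rw [pvB_extend, dif_pos hlt, if_neg hns]
    exact ih (by omega) hsame
  | case3 ps c hnlt =>
    intro hc hps
    rw [pvB_extend, dif_neg hnlt]
    refine ⟨hc, hps, ?_⟩
    show x ≤ c * c
    omega

lemma pvB_isPrime_spec (num : Int) (ps : List Int) (c : Int) (hc : 2 ≤ c)
    (hps : ps = pvPrimesUpTo c) :
    (pvB_isPrime num ps c).1 = pvSpecPrime num ∧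
      2 ≤ (pvB_isPrime num ps c).2.2 ∧
      (pvB_isPrime num ps c).2.1 = pvPrimesUpTo (pvB_isPrime num ps c).2.2 := by
  unfold pvB_isPrime
  by_cases h1 : num < 2
  · simp only [h1, if_true]
    refine ⟨?_, hc, hps⟩
    unfold pvSpecPrime
    have h2 : ¬ (2 ≤ num) := by omega
    simp [h2]
  · simp only [h1, if_false]
    obtain ⟨he2, heq, hecov⟩ := pvB_extend_spec num ps c hc hps
    refine ⟨?_, he2, heq⟩
    rw [heq, pvB_hasSmallFactor_prime num _ he2 (by omega) hecov]
    unfold pvSpecPrime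
    have h2 : (2 ≤ num) := by omega
    simp [h2]

lemma pv_scan_eq (fuel : Nat) : ∀ (n count num : Int) (ps : List Int) (c : Int),
    2 ≤ c → ps = pvPrimesUpTo c → count < n →
    pvA_scan n count num fuel = pvB_scan n count num ps c fuel := by
  induction fuel with
  | zero => intro n count num ps c _ _ hcn; simp [pvA_scan, pvB_scan]
  | succ fuel ih =>
    intro n count num ps c hc hps hcn
    rw [pvA_scan, pvB_scan]
    simp only [hcn, if_true]
    obtain ⟨hb1, hc1, hps1⟩ := pvB_isPrime_spec num ps c hc hps
    have hrev : pvA_reverse = pvB_reverse := rfl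
    unfold pvA_isEmirp
    rw [pvA_isPrime_eq, ← hb1, hrev]
    by_cases hp1 : (pvB_isPrime num ps c).1 = true
    · simp only [hp1, Bool.not_true, Bool.false_eq_true, if_false, if_true]
      by_cases hr : pvB_reverse num = num
      · simp only [hr, decide_not, decide_true, Bool.not_true, Bool.false_and,
          Bool.false_eq_true, if_false]
        exact ih n count (num + 1) _ _ hc1 hps1 hcn
      · have hr' : decide (pvB_reverse num ≠ num) = true := by simp [hr]
        simp only [hr']
        obtain ⟨hb2, hc2, hps2⟩ := pvB_isPrime_spec (pvB_reverse num)
          (pvB_isPrime num ps c).2.1 (pvB_isPrime num ps c).2.2 hc1 hps1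
        rw [pvA_isPrime_eq, ← hb2]
        simp only [Bool.true_and, if_true]
        by_cases hp2 : (pvB_isPrime (pvB_reverse num) (pvB_isPrime num ps c).2.1
            (pvB_isPrime num ps c).2.2).1 = true
        · simp only [hp2, if_true]
          by_cases hlast : count + 1 = n
          · simp [hlast]
          · simp only [hlast, if_false]
            exact ih n (count + 1) (num + 1) _ _ hc2 hps2 (by omega)
        · simp only [Bool.not_eq_true] at hp2
          simp only [hp2, Bool.false_eq_true, if_false]
          exact ih n count (num + 1) _ _ hc2 hps2 hcn
    · simp only [Bool.not_eq_true] at hp1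
      simp only [hp1, Bool.not_false, if_true, Bool.false_eq_true, if_false]
      exact ih n count (num + 1) _ _ hc1 hps1 hcn

-- ===== VERDICT (by name: the statement is the Claim_ definition above) =====
theorem find_nth_emirp_spec : Claim_equal_find_nth_emirp := by
  intro n _
  show find_nth_emirp n = find_nth_emirp_alt n
  unfold find_nth_emirp find_nth_emirp_alt
  by_cases hn : n ≤ 0
  · have h0 : ¬ ((0 : Int) < n) := by omega
    simp only [hn, if_true]
    cases pvFuelBound n with
    | zero => simp [pvA_scan]
    | succ f => simp [pvA_scan, h0]
  · simp only [hn, if_false]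
    exact pv_scan_eq (pvFuelBound n) n 0 2 [2] 2 (by norm_num) (by decide) (by omega)
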